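-- pv_equiv track=rewrite | github.com/hariedamana/Python-Lab | Cycle-3/four_digit.py | even_perfect_squares
-- ===== SOURCE A (Python) =====
-- import math
--
-- def even_perfect_squares(start, end):
--     result = []
--     for num in range(start, end):
--         if 1000 <= num <= 9999 and num % 2 == 0:
--             root = int(math.sqrt(num))
--             if root * root == num:
--                 digits = str(num)
--                 if all(int(digit) % 2 == 0 for digit in digits):
--                     result.append(num)
--     return result
-- ===== SOURCE B (Python) =====
-- # B: iterate candidate square roots 32..99 instead of every number in [start, end);
-- # the window [start, end) only selects which of the (few) qualifying squares survive.
-- def even_perfect_squares(start, end):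
--     result = []
--     for root in range(32, 100):
--         sq = root * root
--         if root % 2 == 0 and all(int(d) % 2 == 0 for d in str(sq)):
--             if start <= sq < end:
--                 result.append(sq)
--     return result
-- ===== Notes on version B (the rewrite author's own statement) =====
-- stated objective: faster
-- what changed: Instead of scanning every integer in [start, end) and testing it for being a four-digit even perfect square with all-even digits, B enumerates the 68 candidate roots 32..99, squares each, applies the static digit/evenness tests, and keeps the square only if it lies in the window [start, end).
import Mathlib
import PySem

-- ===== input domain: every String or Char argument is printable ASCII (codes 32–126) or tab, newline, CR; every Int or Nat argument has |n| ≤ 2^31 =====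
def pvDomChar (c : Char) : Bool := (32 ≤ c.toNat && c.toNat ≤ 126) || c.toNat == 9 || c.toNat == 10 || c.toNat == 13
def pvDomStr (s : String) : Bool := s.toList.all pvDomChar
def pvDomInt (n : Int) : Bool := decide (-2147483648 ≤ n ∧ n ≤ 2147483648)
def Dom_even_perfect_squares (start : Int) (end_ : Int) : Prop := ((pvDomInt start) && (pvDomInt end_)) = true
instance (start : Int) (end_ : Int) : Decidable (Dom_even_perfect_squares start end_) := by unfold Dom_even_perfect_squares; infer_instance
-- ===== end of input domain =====

-- B enumerates the 68 candidate roots 32..99 and squares them instead of scanning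
-- every integer in [start, end); measurably faster when the window is large.


-- ===== PORT A =====
-- `all(int(digit) % 2 == 0 for digit in str(n))`: for the n reached here (1000 ≤ n ≤ 9999)
-- every character of str(n) is a digit '0'..'9', so int(digit) is exactly (code − 48).
def digitsEven (n : Int) : Bool :=
  (PySem.Int.toStr n).toList.all (fun d => PySem.Int.mod ((d.toNat : Int) - 48) 2 = 0)

def even_perfect_squares (start : Int) (end_ : Int) : List Int :=
  (PySem.List.pyRange start end_ 1).foldl (fun result num =>
    if 1000 ≤ num ∧ num ≤ 9999 ∧ PySem.Int.mod num 2 = 0 then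
      -- root = int(math.sqrt(num)): floor square root, exact for 1000 ≤ num ≤ 9999
      let root : Int := (Nat.sqrt num.toNat : Int)
      if root * root = num then
        if digitsEven num then result ++ [num] else result
      else result
    else result) []

-- ===== PORT B =====
def even_perfect_squares_alt (start : Int) (end_ : Int) : List Int :=
  (PySem.List.pyRange 32 100 1).foldl (fun result root =>
    let sq := root * root
    if PySem.Int.mod root 2 = 0 ∧ digitsEven sq = true then
      if start ≤ sq ∧ sq < end_ then result ++ [sq] else result
    else result) []

-- ===== PRECONDITION & SPEC =====
def Spec_even_perfect_squares (start : Int) (end_ : Int) (out : List Int) : Prop := out = even_perfect_squares_alt start end_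
instance (start : Int) (end_ : Int) (out : List Int) : Decidable (Spec_even_perfect_squares start end_ out) := by unfold Spec_even_perfect_squares; infer_instance

-- ===== CLAIM (what is proved, stated in full; the proofs are below) =====
def Claim_equal_even_perfect_squares : Prop := ∀ (start : Int) (end_ : Int), Dom_even_perfect_squares start end_ → Spec_even_perfect_squares start end_ (even_perfect_squares start end_)

-- ===== LEMMAS AND PROOFS =====

-- A's per-element test, as one Bool predicate
def PA (num : Int) : Bool :=
  decide (1000 ≤ num ∧ num ≤ 9999 ∧ PySem.Int.mod num 2 = 0) &&
  decide ((Nat.sqrt num.toNat : Int) * (Nat.sqrt num.toNat : Int) = num) && digitsEven num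

-- the four numbers that pass all the window-independent tests
def L : List Int := [4624, 6084, 6400, 8464]

lemma A_eq_filter (a b : Int) :
    even_perfect_squares a b = (PySem.List.pyRange a b 1).filter PA := by
  unfold even_perfect_squares
  have h : (fun (result : List Int) (num : Int) =>
      if 1000 ≤ num ∧ num ≤ 9999 ∧ PySem.Int.mod num 2 = 0 then
        let root : Int := (Nat.sqrt num.toNat : Int)
        if root * root = num then
          if digitsEven num then result ++ [num] else result
        else result
      else result)
      = (fun result num => if PA num then result ++ [num] else result) := by
    funext result num
    simp only [PA, Bool.and_eq_true, decide_eq_true_eq]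
    split_ifs <;> simp_all
  rw [h, PySem.List.foldl_append_if_eq_filter, List.nil_append]

lemma sqrt_finite_check : ∀ r ∈ List.range 68,
    (PySem.Int.mod (((32 + r) * (32 + r) : Nat) : Int) 2 = 0 ∧
       digitsEven (((32 + r) * (32 + r) : Nat) : Int) = true) →
    (((32 + r) * (32 + r) : Nat) : Int) ∈ L := by decide

lemma PA_iff (n : Int) : PA n = true ↔ n ∈ L := by
  constructor
  · intro h
    simp only [PA, Bool.and_eq_true, decide_eq_true_eq] at h
    obtain ⟨⟨⟨h1, h2, h3⟩, hsq⟩, hd⟩ := h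
    set r : Nat := Nat.sqrt n.toNat with hr
    have hn0 : (0:Int) ≤ n := by omega
    have hcast : ((n.toNat : Int)) = n := Int.toNat_of_nonneg hn0
    have hn : (r * r : ℕ) = n.toNat := by
      have : ((r * r : ℕ) : Int) = (n.toNat : Int) := by push_cast; rw [hcast]; exact hsq
      exact_mod_cast this
    have h1000 : 1000 ≤ n.toNat := by omega
    have h9999 : n.toNat ≤ 9999 := by omega
    have hub : r ≤ 99 := by
      by_contra hc
      have : 100 * 100 ≤ r * r := Nat.mul_le_mul (by omega) (by omega)
      omega
    have hlb : 32 ≤ r := by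
      by_contra hc
      have : r * r ≤ 31 * 31 := Nat.mul_le_mul (by omega) (by omega)
      omega
    have hfin := sqrt_finite_check (r - 32) (by simp only [List.mem_range]; omega)
    have h32 : 32 + (r - 32) = r := by omega
    rw [h32, hn, hcast] at hfin
    exact hfin ⟨h3, hd⟩
  · intro h
    simp only [L, List.mem_cons, List.not_mem_nil, or_false] at h
    rcases h with h | h | h | h <;> subst h
    · simp only [PA, show (4624:Int).toNat = 4624 from rfl,
        show Nat.sqrt 4624 = 68 from by norm_num]; decide
    · simp only [PA, show (6084:Int).toNat = 6084 from rfl,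
        show Nat.sqrt 6084 = 78 from by norm_num]; decide
    · simp only [PA, show (6400:Int).toNat = 6400 from rfl,
        show Nat.sqrt 6400 = 80 from by norm_num]; decide
    · simp only [PA, show (8464:Int).toNat = 8464 from rfl,
        show Nat.sqrt 8464 = 92 from by norm_num]; decide

-- the window filter over L, the pivot both ports are reduced to
def windowL (a b : Int) : List Int :=
  L.filter (fun n => decide (a ≤ n) && decide (n < b))

lemma A_eq_windowL (a b : Int) : even_perfect_squares a b = windowL a b := by
  rw [A_eq_filter]
  have hP : ∀ n ∈ PySem.List.pyRange a b 1, PA n = decide (n ∈ L) := by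
    intro n _
    by_cases h : n ∈ L
    · simp [h, (PA_iff n).mpr h]
    · simp only [h, decide_false]
      exact Bool.eq_false_iff.mpr (fun hc => h ((PA_iff n).mp hc))
  rw [List.filter_congr hP]
  have hXnd : ((PySem.List.pyRange a b 1).filter (fun n => decide (n ∈ L))).Nodup :=
    (PySem.List.nodup_pyRange_one a b).filter _
  have hYnd : (windowL a b).Nodup := (by decide : L.Nodup).filter _
  have hXs : ((PySem.List.pyRange a b 1).filter (fun n => decide (n ∈ L))).Pairwise (· ≤ ·) :=
    ((PySem.List.pairwise_lt_pyRange_one a b).sublist List.filter_sublist).imp le_of_lt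
  have hYs : (windowL a b).Pairwise (· ≤ ·) :=
    ((by decide : L.Pairwise (· < ·)).sublist List.filter_sublist).imp le_of_lt
  have hperm : List.Perm ((PySem.List.pyRange a b 1).filter (fun n => decide (n ∈ L)))
      (windowL a b) := by
    rw [List.perm_ext_iff_of_nodup hXnd hYnd]
    intro n
    simp only [windowL, List.mem_filter, PySem.List.mem_pyRange_one,
      Bool.and_eq_true, decide_eq_true_eq]
    tauto
  exact hperm.eq_of_pairwise (fun x y _ _ hxy hyx => le_antisymm hxy hyx) hXs hYs

lemma B_eq_windowL (a b : Int) : even_perfect_squares_alt a b = windowL a b := by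
  show (PySem.List.pyRange 32 100 1).foldl (fun result root =>
    if PySem.Int.mod root 2 = 0 ∧ digitsEven (root * root) = true then
      if a ≤ root * root ∧ root * root < b then result ++ [root * root] else result
    else result) [] = windowL a b
  rw [PySem.List.foldl_ite_eq_foldl_filter]
  have hf : (PySem.List.pyRange 32 100 1).filter
      (fun root => decide (PySem.Int.mod root 2 = 0 ∧ digitsEven (root * root) = true))
      = [68, 78, 80, 92] := by
    rw [PySem.List.pyRange_one]; decide
  rw [hf]
  simp only [List.foldl_cons, List.foldl_nil, windowL, L, List.filter_cons, List.filter_nil]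
  norm_num
  split_ifs <;> simp_all

-- ===== VERDICT (by name: the statement is the Claim_ definition above) =====
theorem even_perfect_squares_spec : Claim_equal_even_perfect_squares := by
  intro a b _
  show even_perfect_squares a b = even_perfect_squares_alt a b
  rw [A_eq_windowL, B_eq_windowL]
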